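-- pv_equiv track=rewrite | github.com/helmdubo/SCAFFOLD | dev/tools/CFTUV/analysis_boundary_loops.py | _loop_vertex_span
-- ===== SOURCE A (Python) =====
-- def _loop_vertex_span(loop_vert_indices, start_loop_index, end_loop_index):
--     vertex_count = len(loop_vert_indices)
--     if vertex_count == 0:
--         return []
--
--     start_loop_index %= vertex_count
--     end_loop_index %= vertex_count
--     if start_loop_index == end_loop_index:
--         return list(loop_vert_indices)
--
--     span = [loop_vert_indices[start_loop_index]]
--     loop_index = start_loop_index
--     safety = 0
--     while safety < vertex_count:
--         safety += 1
--         loop_index = (loop_index + 1) % vertex_count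
--         span.append(loop_vert_indices[loop_index])
--         if loop_index == end_loop_index:
--             break
--     return span
-- ===== SOURCE B (Python) =====
-- def _loop_vertex_span(loop_vert_indices, start_loop_index, end_loop_index):
--     n = len(loop_vert_indices)
--     if n == 0:
--         return []
--     s = start_loop_index % n
--     e = end_loop_index % n
--     if s == e:
--         return list(loop_vert_indices)
--     if s < e:
--         return list(loop_vert_indices[s:e + 1])
--     return list(loop_vert_indices[s:]) + list(loop_vert_indices[:e + 1])
-- ===== Notes on version B (the rewrite author's own statement) =====
-- stated objective: simpler
-- what changed: Replaces A's element-by-element cyclic walk with a safety counter and modular index stepping by a direct computation of the span via one or two list slices.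
import Mathlib
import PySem

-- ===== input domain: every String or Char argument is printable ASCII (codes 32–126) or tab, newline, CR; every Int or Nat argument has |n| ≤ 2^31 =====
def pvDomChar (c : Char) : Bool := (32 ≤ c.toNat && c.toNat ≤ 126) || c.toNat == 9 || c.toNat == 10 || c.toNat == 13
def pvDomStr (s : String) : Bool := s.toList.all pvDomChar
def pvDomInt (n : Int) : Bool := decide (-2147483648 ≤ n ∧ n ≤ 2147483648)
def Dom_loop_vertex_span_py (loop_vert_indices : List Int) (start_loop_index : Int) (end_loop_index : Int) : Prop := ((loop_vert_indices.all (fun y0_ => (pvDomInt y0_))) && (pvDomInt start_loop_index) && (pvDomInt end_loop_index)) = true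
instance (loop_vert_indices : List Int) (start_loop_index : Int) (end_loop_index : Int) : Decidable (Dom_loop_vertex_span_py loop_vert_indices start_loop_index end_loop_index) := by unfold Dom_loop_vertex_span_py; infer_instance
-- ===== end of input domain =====

-- B replaces A's element-by-element cyclic walk (with a safety counter) by two direct slices; objective: simpler, same O(n) cost.

-- ===== PORT A =====
-- the while loop: `fuel` is the remaining iterations allowed by `safety < vertex_count`;
-- `i` is `loop_index`, `span` the accumulator.  `loop_index` is always in [0, n), so
-- `xs.getD i 0` is exactly Python's `loop_vert_indices[loop_index]`.
def pvLoopA (xs : List Int) (n e : Nat) : Nat → Nat → List Int → List Int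
  | 0, _, span => span
  | fuel + 1, i, span =>
      let i' := (i + 1) % n
      let span' := span ++ [xs.getD i' 0]
      if i' = e then span' else pvLoopA xs n e fuel i' span'

def loop_vertex_span_py (loop_vert_indices : List Int) (start_loop_index : Int) (end_loop_index : Int) : List Int :=
  let vertex_count := loop_vert_indices.length
  if vertex_count = 0 then []
  else
    let s := PySem.Int.mod start_loop_index vertex_count
    let e := PySem.Int.mod end_loop_index vertex_count
    if s = e then loop_vert_indices
    else
      pvLoopA loop_vert_indices vertex_count e.toNat vertex_count s.toNat
        [loop_vert_indices.getD s.toNat 0]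

-- ===== PORT B =====
def loop_vertex_span_py_alt (loop_vert_indices : List Int) (start_loop_index : Int) (end_loop_index : Int) : List Int :=
  let n := loop_vert_indices.length
  if n = 0 then []
  else
    let s := PySem.Int.mod start_loop_index n
    let e := PySem.Int.mod end_loop_index n
    if s = e then loop_vert_indices
    else if s < e then PySem.List.slice loop_vert_indices (some s) (some (e + 1))
    else PySem.List.slice loop_vert_indices (some s) none
         ++ PySem.List.slice loop_vert_indices none (some (e + 1))

-- ===== PRECONDITION & SPEC =====
def Spec_loop_vertex_span_py (loop_vert_indices : List Int) (start_loop_index : Int) (end_loop_index : Int) (out : List Int) : Prop := out = loop_vertex_span_py_alt loop_vert_indices start_loop_index end_loop_index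
instance (loop_vert_indices : List Int) (start_loop_index : Int) (end_loop_index : Int) (out : List Int) : Decidable (Spec_loop_vertex_span_py loop_vert_indices start_loop_index end_loop_index out) := by unfold Spec_loop_vertex_span_py; infer_instance

-- ===== CLAIM (what is proved, stated in full; the proofs are below) =====
def Claim_equal_loop_vertex_span_py : Prop := ∀ (loop_vert_indices : List Int) (start_loop_index : Int) (end_loop_index : Int), Dom_loop_vertex_span_py loop_vert_indices start_loop_index end_loop_index → Spec_loop_vertex_span_py loop_vert_indices start_loop_index end_loop_index (loop_vertex_span_py loop_vert_indices start_loop_index end_loop_index)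

-- ===== LEMMAS AND PROOFS =====

-- A's walk from position i (exclusive) forward to e (inclusive) collects exactly the
-- corresponding cyclic segment of xs.
lemma pvLoopA_spec (xs : List Int) (e : Nat) (he : e < xs.length) :
    ∀ (fuel i : Nat) (span : List Int), i < xs.length → i ≠ e →
      (if i < e then e - i else e + xs.length - i) ≤ fuel →
      pvLoopA xs xs.length e fuel i span =
        span ++ (if i < e then (xs.drop (i + 1)).take (e - i)
                 else xs.drop (i + 1) ++ xs.take (e + 1)) := by
  intro fuel
  induction fuel with
  | zero => intro i span hi hne hd; split_ifs at hd <;> omega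
  | succ fuel ih =>
    intro i span hi hne hd
    by_cases hi1 : i + 1 = xs.length
    · -- wrap-around step: loop_index becomes 0
      have hie : e < i := by omega
      have hd' : e + 1 ≤ fuel + 1 := by rw [if_neg (by omega : ¬ i < e)] at hd; omega
      have h0 : (i + 1) % xs.length = 0 := by rw [hi1]; exact Nat.mod_self _
      have hdropnil : xs.drop (i + 1) = [] := List.drop_eq_nil_of_le (by omega)
      have htake : xs.take (e + 1) = xs.getD 0 0 :: (xs.drop 1).take e := by
        cases xs with
        | nil => simp at he
        | cons a t => simp
      by_cases he0 : e = 0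
      · subst he0
        simp only [pvLoopA, h0]
        rw [if_neg (by omega : ¬ i < 0), hdropnil, List.nil_append, htake]
        simp
      · have hrec := ih 0 (span ++ [xs.getD 0 0]) (by omega) (by omega)
          (by rw [if_pos (by omega : 0 < e)]; omega)
        simp only [pvLoopA, h0, if_neg (by omega : ¬ (0 : ℕ) = e)]
        rw [hrec, if_pos (by omega : 0 < e), if_neg (by omega : ¬ i < e), hdropnil,
          List.nil_append, htake, List.append_assoc]
        simp [List.drop_one]
    · -- no wrap: loop_index becomes i + 1
      have h0 : (i + 1) % xs.length = i + 1 := Nat.mod_eq_of_lt (by omega)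
      have hget : xs.getD (i + 1) 0 = xs[i + 1]'(by omega) :=
        List.getD_eq_getElem xs 0 (by omega)
      have hdrop : xs.drop (i + 1) = xs[i + 1]'(by omega) :: xs.drop (i + 2) :=
        List.drop_eq_getElem_cons (by omega)
      by_cases hie : i + 1 = e
      · simp only [pvLoopA, h0, if_pos hie, if_pos (by omega : i < e), hget]
        rw [hdrop, (by omega : e - i = 1), List.take_succ_cons, List.take_zero]
      · have hrec := ih (i + 1) (span ++ [xs.getD (i + 1) 0]) (by omega) hie
          (by split_ifs at hd ⊢ <;> omega)
        simp only [pvLoopA, h0, if_neg hie, hrec]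
        rw [List.append_assoc]
        congr 1
        by_cases hlt : i < e
        · rw [if_pos (by omega : i + 1 < e), if_pos hlt, hdrop, hget,
            (by omega : e - i = (e - (i + 1)) + 1), List.take_succ_cons,
            List.singleton_append]
        · rw [if_neg (by omega : ¬ i + 1 < e), if_neg hlt, hdrop, hget,
            List.singleton_append, List.cons_append]

theorem loop_vertex_span_py_spec_aux (xs : List Int) (s e : Int) :
    loop_vertex_span_py xs s e = loop_vertex_span_py_alt xs s e := by
  unfold loop_vertex_span_py loop_vertex_span_py_alt
  by_cases h0 : xs.length = 0
  · simp [h0]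
  · simp only [h0]
    have hn : (0 : Int) < xs.length := by exact_mod_cast Nat.pos_of_ne_zero h0
    set si := PySem.Int.mod s (xs.length : Int) with hsi
    set ei := PySem.Int.mod e (xs.length : Int) with hei
    have hs0 : 0 ≤ si := PySem.Int.mod_nonneg s hn
    have he0 : 0 ≤ ei := PySem.Int.mod_nonneg e hn
    have hsl : si < xs.length := PySem.Int.mod_lt s hn
    have hel : ei < xs.length := PySem.Int.mod_lt e hn
    by_cases hse : si = ei
    · simp [hse]
    · simp only [if_neg hse]
      have hsN : si.toNat < xs.length := by omega
      have heN : ei.toNat < xs.length := by omega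
      have hne : si.toNat ≠ ei.toNat := by omega
      have hdropS : xs.drop si.toNat = xs[si.toNat]'hsN :: xs.drop (si.toNat + 1) :=
        List.drop_eq_getElem_cons hsN
      have hgetS : xs.getD si.toNat 0 = xs[si.toNat]'hsN :=
        List.getD_eq_getElem xs 0 hsN
      rw [pvLoopA_spec xs ei.toNat heN xs.length si.toNat _ hsN hne
        (by split_ifs <;> omega)]
      by_cases hlt : si < ei
      · rw [if_pos hlt, if_pos (by omega : si.toNat < ei.toNat),
          PySem.List.slice_toNat xs hs0 (by omega), (by omega : (ei + 1).toNat = ei.toNat + 1),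
          (by omega : ei.toNat + 1 - si.toNat = (ei.toNat - si.toNat) + 1),
          hdropS, List.take_succ_cons, hgetS, List.singleton_append]
      · rw [if_neg hlt, if_neg (by omega : ¬ si.toNat < ei.toNat),
          PySem.List.slice_from xs hs0, PySem.List.slice_to xs (by omega),
          (by omega : (ei + 1).toNat = ei.toNat + 1),
          hdropS, hgetS, List.singleton_append, List.cons_append]

-- ===== VERDICT (by name: the statement is the Claim_ definition above) =====
theorem loop_vertex_span_py_spec : Claim_equal_loop_vertex_span_py := by
  intro xs s e _
  unfold Spec_loop_vertex_span_py
  exact loop_vertex_span_py_spec_aux xs s e
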